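-- pv_equiv track=rewrite | github.com/xcodz/decoding-the-book-of-soyga | soyga_version2_research_scripts_and_outputs/soyga_phase5_article_grade/phase5_code.py | find_sequences_for_target
-- ===== SOURCE A (Python) =====
-- import re, itertools
--
-- def find_sequences_for_target(source, target, cap=500):
--     pos_lists = []
--     for ch in target:
--         pos = [i+1 for i,c in enumerate(source) if c == ch]
--         if not pos:
--             return []
--         pos_lists.append(pos)
--     seqs = []
--     for combo in itertools.product(*pos_lists):
--         seqs.append(combo)
--         if len(seqs) >= cap:
--             break
--     return seqs
-- ===== SOURCE B (Python) =====
-- def _nth_combo(n, pos_lists):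
--     # combination number n of the cartesian product, rightmost list varying fastest
--     combo = []
--     for pl in reversed(pos_lists):
--         n, r = divmod(n, len(pl))
--         combo.append(pl[r])
--     return tuple(reversed(combo))
--
-- def find_sequences_for_target(source, target, cap=500):
--     pos_lists = []
--     for ch in target:
--         pos = [i + 1 for i, c in enumerate(source) if c == ch]
--         if not pos:
--             return []
--         pos_lists.append(pos)
--     total = 1
--     for pl in pos_lists:
--         total *= len(pl)
--     seqs = []
--     k = 0
--     while True:
--         seqs.append(_nth_combo(k, pos_lists))
--         k += 1
--         if len(seqs) >= cap or k == total:
--             break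
--     return seqs
-- ===== Notes on version B (the rewrite author's own statement) =====
-- stated objective: alternative
-- what changed: B replaces the itertools.product stream with direct index enumeration: it computes the product of the position-list lengths and, counting k upward until the cap is reached or all combinations are emitted, reconstructs the k-th combination from k by mixed-radix decomposition over the position lists.
import Mathlib
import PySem

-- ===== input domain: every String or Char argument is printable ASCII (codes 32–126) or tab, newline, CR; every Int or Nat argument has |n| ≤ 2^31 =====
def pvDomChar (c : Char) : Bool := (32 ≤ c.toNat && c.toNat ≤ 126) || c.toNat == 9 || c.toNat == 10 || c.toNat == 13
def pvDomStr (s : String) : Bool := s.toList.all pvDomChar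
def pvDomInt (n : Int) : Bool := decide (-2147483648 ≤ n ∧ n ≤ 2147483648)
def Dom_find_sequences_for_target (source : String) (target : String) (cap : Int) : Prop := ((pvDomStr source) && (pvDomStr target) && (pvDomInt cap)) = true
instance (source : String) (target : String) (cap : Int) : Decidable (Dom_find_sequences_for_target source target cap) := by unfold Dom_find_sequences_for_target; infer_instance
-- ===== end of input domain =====

-- B enumerates combinations directly by index (mixed-radix decoding of a counter bounded by
-- the product of list lengths) instead of A's itertools.product stream; same value, similar cost.

-- ===== PORT A =====
-- [i+1 for i,c in enumerate(source) if c == ch]  (this line is verbatim the same in both Pythons)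
def pvBuildPos (s : List Char) (ch : Char) : List Int :=
  (PySem.List.enumerate s).filterMap (fun p => if p.2 = ch then some (p.1 + 1) else none)

-- the 'for ch in target' loop: none = early 'return []' on an empty position list
def pvPosLoop (s : List Char) : List Char → Option (List (List Int))
  | [] => some []
  | ch :: rest =>
      let pos := pvBuildPos s ch
      if pos = [] then none
      else (pvPosLoop s rest).map (fun pls => pos :: pls)

-- itertools.product(*pos_lists), in product order (rightmost varies fastest)
def pvProd : List (List Int) → List (List Int)
  | [] => [[]]
  | l :: ls => l.flatMap (fun x => (pvProd ls).map (fun c => x :: c))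

-- 'for combo in …: seqs.append(combo); if len(seqs) >= cap: break'
def pvCapLoop : List (List Int) → List (List Int) → Int → List (List Int)
  | [], seqs, _ => seqs
  | c :: rest, seqs, cap =>
      let seqs' := seqs ++ [c]
      if (seqs'.length : Int) ≥ cap then seqs' else pvCapLoop rest seqs' cap

def find_sequences_for_target (source : String) (target : String) (cap : Int) : List (List Int) :=
  match pvPosLoop source.toList target.toList with
  | none => []
  | some pls => pvCapLoop (pvProd pls) [] cap

-- ===== PORT B =====
-- loop body of 'for pl in reversed(pos_lists): n, r = divmod(n, len(pl)); combo.append(pl[r])';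
-- pl[r] is ported as pyGet? … getD 0 — exact here since 0 ≤ r < len(pl) always holds
def pvStep (st : Int × List Int) (pl : List Int) : Int × List Int :=
  (PySem.Int.floordiv st.1 (pl.length : Int),
   st.2 ++ [(PySem.List.pyGet? pl (PySem.Int.mod st.1 (pl.length : Int))).getD 0])

-- _nth_combo(n, pos_lists)
def pvDecode (n : Int) (pls : List (List Int)) : List Int :=
  ((pls.reverse.foldl pvStep (n, [])).2).reverse

-- the 'while True' loop of B; fuel only makes the recursion structurally total — it is
-- called with fuel = total and the loop always stops within that many iterations
def pvBLoop (pls : List (List Int)) (cap : Int) (total : Nat) :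
    Nat → Nat → List (List Int) → List (List Int)
  | 0, _, seqs => seqs
  | fuel + 1, k, seqs =>
      let seqs' := seqs ++ [pvDecode (k : Int) pls]
      let k' := k + 1
      if ((seqs'.length : Int) ≥ cap) ∨ (k' = total) then seqs'
      else pvBLoop pls cap total fuel k' seqs'

def find_sequences_for_target_alt (source : String) (target : String) (cap : Int) : List (List Int) :=
  match pvPosLoop source.toList target.toList with
  | none => []
  | some pls =>
      let total := pls.foldl (fun acc pl => acc * pl.length) 1
      pvBLoop pls cap total total 0 []

-- ===== PRECONDITION & SPEC =====
def Spec_find_sequences_for_target (source : String) (target : String) (cap : Int) (out : List (List Int)) : Prop := out = find_sequences_for_target_alt source target cap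
instance (source : String) (target : String) (cap : Int) (out : List (List Int)) : Decidable (Spec_find_sequences_for_target source target cap out) := by unfold Spec_find_sequences_for_target; infer_instance

-- ===== CLAIM (what is proved, stated in full; the proofs are below) =====
def Claim_equal_find_sequences_for_target : Prop := ∀ (source : String) (target : String) (cap : Int), Dom_find_sequences_for_target source target cap → Spec_find_sequences_for_target source target cap (find_sequences_for_target source target cap)

-- ===== LEMMAS AND PROOFS =====

-- A's capped loop is a take of the product stream
theorem pvCapLoop_eq (cs : List (List Int)) : ∀ (seqs : List (List Int)) (cap : Int),
    pvCapLoop cs seqs cap = seqs ++ cs.take ((max cap ((seqs.length : Int) + 1) - seqs.length).toNat) := by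
  induction cs with
  | nil => intro seqs cap; simp [pvCapLoop]
  | cons c rest ih =>
    intro seqs cap
    simp only [pvCapLoop]
    by_cases h : (((seqs ++ [c]).length : Int) ≥ cap)
    · rw [if_pos h]
      have h1 : (max cap ((seqs.length : Int) + 1) - (seqs.length : Int)).toNat = 1 := by
        simp only [List.length_append, List.length_cons, List.length_nil] at h
        push_cast at h ⊢; omega
      rw [h1]; simp
    · rw [if_neg h, ih]
      have h2 : (max cap ((seqs.length : Int) + 1) - (seqs.length : Int)).toNat
          = (max cap (((seqs ++ [c]).length : Int) + 1) - ((seqs ++ [c]).length : Int)).toNat + 1 := by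
        simp only [List.length_append, List.length_cons, List.length_nil] at h ⊢
        push_cast at h ⊢; omega
      rw [h2, List.take_succ_cons]; simp

-- B's loop emits the decoded combinations for k, k+1, …; the number emitted is
-- min (total - k) ((max cap (len+1) - len).toNat)
theorem pvBLoop_eq (pls : List (List Int)) (cap : Int) (total : Nat) :
    ∀ (fuel k : Nat) (seqs : List (List Int)), k < total → total - k ≤ fuel →
    pvBLoop pls cap total fuel k seqs =
      seqs ++ (List.range' k (min (total - k)
        ((max cap ((seqs.length : Int) + 1) - seqs.length).toNat))).map (fun (n : Nat) => pvDecode (n : Int) pls) := by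
  intro fuel
  induction fuel with
  | zero => intro k seqs hk hf; omega
  | succ fuel ih =>
    intro k seqs hk hf
    simp only [pvBLoop]
    set L := seqs.length with hL
    by_cases h : ((((seqs ++ [pvDecode (k : Int) pls]).length : Int) ≥ cap) ∨ (k + 1 = total))
    · rw [if_pos h]
      have he : min (total - k) ((max cap ((L : Int) + 1) - L).toNat) = 1 := by
        simp only [List.length_append, List.length_cons, List.length_nil] at h
        rcases h with h | h
        · have : (max cap ((L : Int) + 1) - L).toNat = 1 := by push_cast at h ⊢; omega
          rw [this]; omega
        · have h1 : total - k = 1 := by omega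
          have h2 : 1 ≤ (max cap ((L : Int) + 1) - L).toNat := by push_cast; omega
          omega
      rw [he]; simp
    · rw [if_neg h]
      push_neg at h
      obtain ⟨h1, h2⟩ := h
      have hk' : k + 1 < total := lt_of_le_of_ne (by omega) h2
      rw [ih (k + 1) (seqs ++ [pvDecode (k : Int) pls]) hk' (by omega)]
      have he : min (total - k) ((max cap ((L : Int) + 1) - L).toNat)
          = min (total - (k + 1))
              ((max cap (((seqs ++ [pvDecode (k : Int) pls]).length : Int) + 1)
                - ((seqs ++ [pvDecode (k : Int) pls]).length : Int)).toNat) + 1 := by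
        simp only [List.length_append, List.length_cons, List.length_nil] at h1 ⊢
        have ha : (max cap ((L : Int) + 1) - L).toNat
            = (max cap ((L : Int) + 1 + 1) - ((L : Int) + 1)).toNat + 1 := by
          push_cast at h1 ⊢; omega
        rw [ha]
        push_cast
        omega
      rw [he, List.range'_succ, List.map_cons]
      simp

-- every position list produced by the loop is nonempty
theorem pvPosLoop_nonempty (s : List Char) : ∀ (t : List Char) (pls : List (List Int)),
    pvPosLoop s t = some pls → ∀ l ∈ pls, l ≠ [] := by
  intro t
  induction t with
  | nil => intro pls h; simp [pvPosLoop] at h; subst h; simp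
  | cons ch rest ih =>
    intro pls h
    simp only [pvPosLoop] at h
    by_cases hpos : pvBuildPos s ch = []
    · rw [if_pos hpos] at h; cases h
    · rw [if_neg hpos] at h
      simp only [Option.map_eq_some_iff] at h
      obtain ⟨pls', h', heq⟩ := h
      subst heq
      intro l hl
      rcases List.mem_cons.mp hl with rfl | hl'
      · exact hpos
      · exact ih pls' h' l hl'

theorem pvFoldMul (pls : List (List Int)) : ∀ (a : Nat),
    pls.foldl (fun acc pl => acc * pl.length) a = a * (pls.map List.length).prod := by
  induction pls with
  | nil => intro a; simp
  | cons l ls ih => intro a; simp [List.foldl_cons, ih, mul_assoc]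

theorem pvProd_length (pls : List (List Int)) :
    (pvProd pls).length = (pls.map List.length).prod := by
  induction pls with
  | nil => simp [pvProd]
  | cons l ls ih =>
    simp [pvProd, List.length_flatMap, ih, List.map_const']

theorem pvProd_prod_pos (pls : List (List Int)) (h : ∀ l ∈ pls, l ≠ []) :
    0 < (pls.map List.length).prod := by
  apply List.prod_pos
  intro x hx
  simp only [List.mem_map] at hx
  obtain ⟨l, hl, rfl⟩ := hx
  have := h l hl
  cases l with
  | nil => simp at this
  | cons a b => simp

-- indexing a uniform-block flatMap
theorem pvProd_index (l : List Int) (acc : List (List Int)) : ∀ (m : Nat),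
    m < l.length * acc.length →
    (l.flatMap (fun x => acc.map (fun c => x :: c)))[m]? =
      (acc[m % acc.length]?).map (fun c => l[m / acc.length]! :: c) := by
  induction l with
  | nil => intro m hm; simp at hm
  | cons x xs ih =>
    intro m hm
    have hL : 0 < acc.length := by
      rcases Nat.eq_zero_or_pos acc.length with h0 | h0
      · rw [h0, Nat.mul_zero] at hm; omega
      · exact h0
    simp only [List.flatMap_cons]
    by_cases hm1 : m < acc.length
    · rw [List.getElem?_append_left (by simpa using hm1)]
      rw [Nat.mod_eq_of_lt hm1, Nat.div_eq_of_lt hm1]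
      rw [getElem!_pos (x :: xs) 0 (by simp)]
      simp [List.getElem?_map]
    · have hle : acc.length ≤ m := Nat.le_of_not_lt hm1
      have hm' : m - acc.length < xs.length * acc.length := by
        have hx : m < xs.length * acc.length + acc.length := by
          have := hm; simp only [List.length_cons, Nat.succ_mul] at this; omega
        omega
      rw [List.getElem?_append_right (by simpa using hle)]
      have hlen : (acc.map (fun c => x :: c)).length = acc.length := by simp
      rw [hlen, ih (m - acc.length) hm']
      have e1 : (m - acc.length) % acc.length = m % acc.length :=
        (Nat.mod_eq_sub_mod hle).symm
      have e2 : (m - acc.length) / acc.length = m / acc.length - 1 := by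
        simpa using Nat.sub_mul_div m acc.length 1
      have e3 : 1 ≤ m / acc.length := by
        rw [Nat.le_div_iff_mul_le hL]; simpa using hle
      rw [e1, e2]
      congr 1
      funext c
      congr 1
      have hmlt : m / acc.length < (x :: xs).length := by
        rw [Nat.div_lt_iff_lt_mul hL]; exact hm
      rw [getElem!_pos (x :: xs) (m / acc.length) hmlt,
          getElem!_pos xs (m / acc.length - 1) (by simp at hmlt ⊢; omega)]
      rw [List.getElem_cons]
      split
      · omega
      · rfl

-- mixed-radix decoding: quotient and digits
theorem pvDecode_spec (pls : List (List Int)) (h : ∀ l ∈ pls, l ≠ []) (n : Nat) :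
    (pls.reverse.foldl pvStep ((n : Int), [])).1 = ((n / (pls.map List.length).prod : Nat) : Int) ∧
    (pvProd pls)[n % (pls.map List.length).prod]? = some (pvDecode (n : Int) pls) := by
  induction pls generalizing n with
  | nil => simp [pvDecode, pvProd, Nat.mod_one]
  | cons l ls ih =>
    have hl : l ≠ [] := h l (by simp)
    have hls : ∀ l' ∈ ls, l' ≠ [] := fun l' hl' => h l' (by simp [hl'])
    have hLpos : 0 < l.length := List.length_pos_iff.mpr hl
    have hPpos : 0 < (ls.map List.length).prod := pvProd_prod_pos ls hls
    obtain ⟨ih1, ih2⟩ := ih hls n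
    set P := (ls.map List.length).prod with hP
    have hfold : (l :: ls).reverse.foldl pvStep ((n : Int), []) =
        pvStep (ls.reverse.foldl pvStep ((n : Int), [])) l := by
      rw [List.reverse_cons, List.foldl_append]; simp
    have hq : (PySem.Int.floordiv ((ls.reverse.foldl pvStep ((n : Int), [])).1) (l.length : Int))
        = ((n / P / l.length : Nat) : Int) := by
      rw [ih1]; exact_mod_cast PySem.Int.floordiv_natCast (n / P) l.length
    have hr : (PySem.Int.mod ((ls.reverse.foldl pvStep ((n : Int), [])).1) (l.length : Int))
        = ((n / P % l.length : Nat) : Int) := by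
      rw [ih1]; exact_mod_cast PySem.Int.mod_natCast (n / P) l.length
    have hv : (PySem.List.pyGet? l ((n / P % l.length : Nat) : Int)).getD 0
        = l[n / P % l.length]! := by
      rw [PySem.List.pyGet?_natCast]
      rw [getElem!_pos l _ (Nat.mod_lt _ hLpos)]
      rw [List.getElem?_eq_getElem (Nat.mod_lt _ hLpos)]
      rfl
    constructor
    · rw [hfold]
      simp only [pvStep, hq]
      have hPl : ((l :: ls).map List.length).prod = P * l.length := by
        simp [← hP, Nat.mul_comm]
      rw [hPl, ← Nat.div_div_eq_div_mul]
    · have hdec : pvDecode ((n : Int)) (l :: ls) =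
          l[n / P % l.length]! :: pvDecode ((n : Int)) ls := by
        unfold pvDecode
        rw [hfold]
        simp only [pvStep, hr, hv]
        simp
      rw [hdec]
      simp only [pvProd]
      have hm : n % ((l :: ls).map List.length).prod < l.length * P := by
        simp only [List.map_cons, List.prod_cons, ← hP]
        exact Nat.mod_lt _ (by positivity)
      have hprodlen : (pvProd ls).length = P := pvProd_length ls
      rw [pvProd_index l (pvProd ls) _ (by rw [hprodlen]; exact hm)]
      set m := n % ((l :: ls).map List.length).prod with hm'
      have hmP : ((l :: ls).map List.length).prod = P * l.length := by
        simp [← hP, Nat.mul_comm]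
      have e1 : m % (pvProd ls).length = n % P := by
        rw [hprodlen, hm', hmP]
        rw [Nat.mod_mod_of_dvd n (Dvd.intro _ rfl)]
      have e2 : m / (pvProd ls).length = n / P % l.length := by
        rw [hprodlen, hm', hmP]
        exact Nat.mod_mul_right_div_self n P l.length
      rw [e1, e2, ih2]
      simp

-- ===== VERDICT (by name: the statement is the Claim_ definition above) =====
theorem find_sequences_for_target_spec : Claim_equal_find_sequences_for_target := by
  intro source target cap _
  unfold Spec_find_sequences_for_target find_sequences_for_target find_sequences_for_target_alt
  cases hp : pvPosLoop source.toList target.toList with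
  | none => simp
  | some pls =>
    simp only []
    have hne := pvPosLoop_nonempty source.toList target.toList pls hp
    set P := (pls.map List.length).prod with hP
    have hPpos : 0 < P := pvProd_prod_pos pls hne
    have hlen : (pvProd pls).length = P := pvProd_length pls
    have htot : pls.foldl (fun acc pl => acc * pl.length) 1 = P := by
      rw [pvFoldMul, Nat.one_mul]
    set K := min P ((max cap 1).toNat) with hK
    have hA : pvCapLoop (pvProd pls) [] cap = (pvProd pls).take ((max cap 1).toNat) := by
      rw [pvCapLoop_eq]; simp
    have hB : pvBLoop pls cap P P 0 [] =
        (List.range K).map (fun (n : Nat) => pvDecode (n : Int) pls) := by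
      rw [pvBLoop_eq pls cap P P 0 [] hPpos (by omega), List.range_eq_range', List.nil_append]
      congr 2
      simp only [List.length_nil, Nat.cast_zero, Nat.sub_zero, zero_add, hK, Int.sub_zero]
    rw [hA, htot, hB]
    apply List.ext_getElem
    · simp [hlen, hK, Nat.min_comm]
    · intro i h1 h2
      have hiP : i < P := by
        rw [List.length_take, hlen] at h1; omega
      rw [List.getElem_map, List.getElem_take, List.getElem_range]
      have hspec := (pvDecode_spec pls hne i).2
      rw [Nat.mod_eq_of_lt (show i < (pls.map List.length).prod from hP ▸ hiP)] at hspec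
      rw [List.getElem?_eq_getElem (show i < (pvProd pls).length from by rw [hlen]; exact hiP)] at hspec
      simpa using Option.some.inj hspec
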